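-- pv_equiv track=rewrite | github.com/FRANCHI-Charles/MIDI-pattern-detection | ripdalib/main.py | _windowing
-- ===== SOURCE A (Python) =====
-- def _windowing(P, L):
--     """
--     Splits the pattern P into multiple sub-patterns of exact length L.
--     - Ensures each window starts at a valid onset.
--     - Prevents empty windows.
--     """
--     if not P:
--         return []
--
--     P = sorted(P, key=lambda x: x[0])  # Sort by onset
--     windowed_patterns = []
--     i = 0  # Index to track starting point
--
--     while i < len(P):
--         t1 = P[i][0]  # Base onset for this window
--         window = [p for p in P if t1 <= p[0] < t1 + L]
--
--         if not window:  # Skip empty windows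
--             i += 1
--             continue
--
--         windowed_patterns.append(window)
--
--         # Move to next onset after the current window
--         while i < len(P) and P[i][0] < t1 + L:
--             i += 1
--
--     return windowed_patterns
-- ===== SOURCE B (Python) =====
-- def _windowing(P, L):
--     """Two-pointer sweep: sort once, then each window is a contiguous slice Q[i:j]."""
--     Q = sorted(P, key=lambda x: x[0])
--     out = []
--     n = len(Q)
--     i = 0
--     while i < n:
--         t1 = Q[i][0]
--         j = i
--         while j < n and Q[j][0] < t1 + L:
--             j += 1
--         if i < j:
--             out.append(Q[i:j])
--             i = j
--         else:
--             i += 1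
--     return out
-- ===== Notes on version B (the rewrite author's own statement) =====
-- stated objective: faster
-- what changed: Replaces the per-window full-list filter (window = [p for p in P if ...]) by a two-pointer sweep over the sorted list that emits each window as a contiguous slice Q[i:j].
import Mathlib
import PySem

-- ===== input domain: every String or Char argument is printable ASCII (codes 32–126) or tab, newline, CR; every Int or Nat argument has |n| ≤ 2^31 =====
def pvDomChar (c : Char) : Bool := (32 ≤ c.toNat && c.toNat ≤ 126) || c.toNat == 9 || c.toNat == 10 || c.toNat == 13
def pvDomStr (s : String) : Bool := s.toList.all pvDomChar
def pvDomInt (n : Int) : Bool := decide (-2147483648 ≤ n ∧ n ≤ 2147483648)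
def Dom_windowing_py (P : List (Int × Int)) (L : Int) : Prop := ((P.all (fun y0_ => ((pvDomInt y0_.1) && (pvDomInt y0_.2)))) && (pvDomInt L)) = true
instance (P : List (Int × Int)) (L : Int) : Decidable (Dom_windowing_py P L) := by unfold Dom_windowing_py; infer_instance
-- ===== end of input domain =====

-- B replaces A's per-window filter over the whole list by a two-pointer sweep emitting
-- contiguous slices of the sorted list (objective: faster).
-- Loops are ported with a structural Nat fuel (index strictly increases, so length+1 steps
-- always suffice; fuel only makes the while-loops total, it never changes the value).

-- ===== PORT A =====
-- 'window = [p for p in P if t1 <= p[0] < t1 + L]'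
def windowA (Q : List (Int × Int)) (L t1 : Int) : List (Int × Int) :=
  Q.filter (fun p => decide (t1 ≤ p.1) && decide (p.1 < t1 + L))

-- inner while: 'while i < len(P) and P[i][0] < t1 + L: i += 1'
def windowAdvA (Q : List (Int × Int)) (L t1 : Int) : Nat → Nat → Nat
  | 0, i => i
  | fuel + 1, i =>
    if h : i < Q.length then
      if Q[i].1 < t1 + L then windowAdvA Q L t1 fuel (i + 1) else i
    else i

-- outer while of A ('t1 = P[i][0]' is Q[i].1 inline)
def winA (Q : List (Int × Int)) (L : Int) : Nat → Nat → List (List (Int × Int))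
  | 0, _ => []
  | fuel + 1, i =>
    if h : i < Q.length then
      if windowA Q L Q[i].1 = [] then winA Q L fuel (i + 1)
      else windowA Q L Q[i].1 :: winA Q L fuel (windowAdvA Q L Q[i].1 (Q.length + 1) i)
    else []

def windowing_py (P : List (Int × Int)) (L : Int) : List (List (Int × Int)) :=
  if P = [] then []
  else
    winA (PySem.List.sorted P (fun x => x.1)) L
      ((PySem.List.sorted P (fun x => x.1)).length + 1) 0

-- ===== PORT B =====
-- inner while: 'while j < n and Q[j][0] < t1 + L: j += 1'
def windowAdvB (Q : List (Int × Int)) (L t1 : Int) : Nat → Nat → Nat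
  | 0, j => j
  | fuel + 1, j =>
    if h : j < Q.length then
      if Q[j].1 < t1 + L then windowAdvB Q L t1 fuel (j + 1) else j
    else j

-- outer while of B: each window is the contiguous slice Q[i:j]
-- (i ≤ j natural, so Q[i:j] is exactly (Q.drop i).take (j - i), cf. PySem.List.slice_natCast)
def winB (Q : List (Int × Int)) (L : Int) : Nat → Nat → List (List (Int × Int))
  | 0, _ => []
  | fuel + 1, i =>
    if h : i < Q.length then
      if i < windowAdvB Q L Q[i].1 (Q.length + 1) i then
        ((Q.drop i).take (windowAdvB Q L Q[i].1 (Q.length + 1) i - i))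
          :: winB Q L fuel (windowAdvB Q L Q[i].1 (Q.length + 1) i)
      else winB Q L fuel (i + 1)
    else []

def windowing_py_alt (P : List (Int × Int)) (L : Int) : List (List (Int × Int)) :=
  winB (PySem.List.sorted P (fun x => x.1)) L
    ((PySem.List.sorted P (fun x => x.1)).length + 1) 0

-- ===== PRECONDITION & SPEC =====
def Spec_windowing_py (P : List (Int × Int)) (L : Int) (out : List (List (Int × Int))) : Prop := out = windowing_py_alt P L
instance (P : List (Int × Int)) (L : Int) (out : List (List (Int × Int))) : Decidable (Spec_windowing_py P L out) := by unfold Spec_windowing_py; infer_instance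

-- ===== CLAIM (what is proved, stated in full; the proofs are below) =====
def Claim_equal_windowing_py : Prop := ∀ (P : List (Int × Int)) (L : Int), Dom_windowing_py P L → Spec_windowing_py P L (windowing_py P L)

-- ===== LEMMAS AND PROOFS =====

lemma windowAdv_eq (Q : List (Int × Int)) (L t1 : Int) :
    ∀ fuel i, windowAdvA Q L t1 fuel i = windowAdvB Q L t1 fuel i := by
  intro fuel
  induction fuel with
  | zero => intro i; rfl
  | succ fuel ih =>
    intro i
    simp only [windowAdvA, windowAdvB]
    split_ifs with h hlt
    · exact ih (i + 1)
    · rfl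
    · rfl

lemma windowAdvB_ge (Q : List (Int × Int)) (L t1 : Int) :
    ∀ fuel i, i ≤ windowAdvB Q L t1 fuel i := by
  intro fuel
  induction fuel with
  | zero => intro i; exact le_refl i
  | succ fuel ih =>
    intro i
    simp only [windowAdvB]
    split_ifs with h hlt
    · exact le_trans (by omega) (ih (i + 1))
    · exact le_refl i
    · exact le_refl i

lemma windowAdvB_step (Q : List (Int × Int)) (L t1 : Int) (fuel i : Nat)
    (h : i < Q.length) (hlt : Q[i].1 < t1 + L) :
    windowAdvB Q L t1 (fuel + 1) i = windowAdvB Q L t1 fuel (i + 1) := by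
  simp only [windowAdvB]
  rw [dif_pos h, if_pos hlt]

lemma windowAdvB_mid (Q : List (Int × Int)) (L t1 : Int) :
    ∀ fuel i, ∀ p ∈ (Q.drop i).take (windowAdvB Q L t1 fuel i - i), p.1 < t1 + L := by
  intro fuel
  induction fuel with
  | zero => intro i p hp; simp [windowAdvB] at hp
  | succ fuel ih =>
    intro i p hp
    simp only [windowAdvB] at hp
    by_cases h : i < Q.length
    · rw [dif_pos h] at hp
      by_cases hlt : Q[i].1 < t1 + L
      · rw [if_pos hlt] at hp
        have hge := windowAdvB_ge Q L t1 fuel (i + 1)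
        rw [List.drop_eq_getElem_cons h] at hp
        have hsub : windowAdvB Q L t1 fuel (i + 1) - i
            = (windowAdvB Q L t1 fuel (i + 1) - (i + 1)) + 1 := by omega
        rw [hsub, List.take_succ_cons] at hp
        rcases List.mem_cons.mp hp with rfl | hp
        · exact hlt
        · exact ih (i + 1) p hp
      · rw [if_neg hlt] at hp
        simp at hp
    · rw [dif_neg h] at hp
      simp at hp

-- in a key-sorted list, the element at index j bounds everything from j on
lemma sorted_drop_head (Q : List (Int × Int)) (hs : Q.Pairwise (fun a b => a.1 ≤ b.1))
    {j : Nat} (hj : j < Q.length) : ∀ p ∈ Q.drop j, (Q[j]).1 ≤ p.1 := by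
  intro p hp
  rw [List.drop_eq_getElem_cons hj] at hp
  rcases List.mem_cons.mp hp with rfl | hp
  · exact le_refl _
  · have h2 := (hs.drop (i := j))
    rw [List.drop_eq_getElem_cons hj] at h2
    exact (List.pairwise_cons.mp h2).1 p hp

-- with enough fuel, everything at or past the stopping index of the inner while has onset ≥ t1 + L
lemma windowAdvB_tail (Q : List (Int × Int)) (L t1 : Int)
    (hs : Q.Pairwise (fun a b => a.1 ≤ b.1)) :
    ∀ fuel i, Q.length - i ≤ fuel →
      ∀ p ∈ Q.drop (windowAdvB Q L t1 fuel i), t1 + L ≤ p.1 := by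
  intro fuel
  induction fuel with
  | zero =>
    intro i hf p hp
    have : Q.length ≤ i := by omega
    rw [windowAdvB, List.drop_eq_nil_iff.mpr (by omega)] at hp
    simp at hp
  | succ fuel ih =>
    intro i hf p hp
    simp only [windowAdvB] at hp
    by_cases h : i < Q.length
    · rw [dif_pos h] at hp
      by_cases hlt : Q[i].1 < t1 + L
      · rw [if_pos hlt] at hp
        exact ih (i + 1) (by omega) p hp
      · rw [if_neg hlt] at hp
        exact le_trans (by omega) (sorted_drop_head Q hs h p hp)
    · rw [dif_neg h] at hp
      rw [List.drop_eq_nil_iff.mpr (by omega)] at hp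
      simp at hp

-- degenerate L: both programs produce no window at all
lemma winA_nil (Q : List (Int × Int)) (L : Int) (hL : L ≤ 0) :
    ∀ fuel i, winA Q L fuel i = [] := by
  intro fuel
  induction fuel with
  | zero => intro i; rfl
  | succ fuel ih =>
    intro i
    simp only [winA]
    split_ifs with h hw
    · exact ih (i + 1)
    · exfalso; apply hw
      rw [windowA, List.filter_eq_nil_iff]
      intro p _ hp
      simp only [Bool.and_eq_true, decide_eq_true_eq] at hp
      omega
    · rfl

lemma winB_nil (Q : List (Int × Int)) (L : Int) (hL : L ≤ 0) :
    ∀ fuel i, winB Q L fuel i = [] := by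
  intro fuel
  induction fuel with
  | zero => intro i; rfl
  | succ fuel ih =>
    intro i
    simp only [winB]
    split_ifs with h hij
    · exfalso
      have hstop : windowAdvB Q L Q[i].1 (Q.length + 1) i = i := by
        simp only [windowAdvB]
        have hnlt : ¬ (Q[i]).1 < (Q[i]).1 + L := by omega
        rw [dif_pos h, if_neg hnlt]
      omega
    · exact ih (i + 1)
    · rfl

lemma winA_eq_winB (Q : List (Int × Int)) (L : Int) (hL : 0 < L)
    (hs : Q.Pairwise (fun a b => a.1 ≤ b.1)) :
    ∀ fuel i, (∀ p ∈ Q.take i, ∀ q ∈ Q.drop i, p.1 < q.1) →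
      winA Q L fuel i = winB Q L fuel i := by
  intro fuel
  induction fuel with
  | zero => intro i _; rfl
  | succ fuel ih =>
    intro i hinv
    by_cases h : i < Q.length
    · obtain ⟨t1, ht1⟩ : ∃ t, (Q[i]).1 = t := ⟨_, rfl⟩
      have hmid := windowAdvB_mid Q L t1 (Q.length + 1) i
      have htail := windowAdvB_tail Q L t1 hs (Q.length + 1) i (by omega)
      have hjs := windowAdv_eq Q L t1 (Q.length + 1) i
      have hge1 := windowAdvB_ge Q L t1 Q.length (i + 1)
      have hstep : windowAdvB Q L t1 (Q.length + 1) i = windowAdvB Q L t1 Q.length (i + 1) :=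
        windowAdvB_step Q L t1 Q.length i h (by omega)
      set j := windowAdvB Q L t1 (Q.length + 1) i with hj
      have hij : i + 1 ≤ j := by omega
      have hji : i ≤ j := by omega
      have hmemi : Q[i] ∈ Q.drop i := by
        rw [List.drop_eq_getElem_cons h]; exact List.mem_cons_self
      -- the filtered window IS the contiguous slice Q[i:j]
      have hwindow : windowA Q L t1 = (Q.drop i).take (j - i) := by
        rw [windowA]
        conv_lhs => rw [← List.take_append_drop i Q, ← List.take_append_drop (j - i) (Q.drop i)]
        rw [List.filter_append, List.filter_append]
        have h1 : (Q.take i).filter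
            (fun p => decide (t1 ≤ p.1) && decide (p.1 < t1 + L)) = [] := by
          rw [List.filter_eq_nil_iff]
          intro p hp
          have := hinv p hp Q[i] hmemi
          simp only [Bool.and_eq_true, decide_eq_true_eq, not_and]
          omega
        have h2 : ((Q.drop i).take (j - i)).filter
            (fun p => decide (t1 ≤ p.1) && decide (p.1 < t1 + L))
            = (Q.drop i).take (j - i) := by
          rw [List.filter_eq_self]
          intro p hp
          have hub := hmid p hp
          have hlb : (Q[i]).1 ≤ p.1 := sorted_drop_head Q hs h p (List.mem_of_mem_take hp)
          simp only [Bool.and_eq_true, decide_eq_true_eq]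
          omega
        have h3 : ((Q.drop i).drop (j - i)).filter
            (fun p => decide (t1 ≤ p.1) && decide (p.1 < t1 + L)) = [] := by
          rw [List.drop_drop, Nat.add_sub_cancel' hji, List.filter_eq_nil_iff]
          intro p hp
          have h4 := htail p hp
          simp only [Bool.and_eq_true, decide_eq_true_eq, not_and]
          omega
        rw [h1, h2, h3, List.nil_append, List.append_nil]
      have hwne : (Q.drop i).take (j - i) ≠ [] := by
        have hm : Q[i] ∈ (Q.drop i).take (j - i) := by
          rw [List.drop_eq_getElem_cons h]
          have he : j - i = (j - (i + 1)) + 1 := by omega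
          rw [he, List.take_succ_cons]
          exact List.mem_cons_self
        exact List.ne_nil_of_mem hm
      -- the invariant at the new index j
      have hinv' : ∀ p ∈ Q.take j, ∀ q ∈ Q.drop j, p.1 < q.1 := by
        intro p hp q hq
        have hq' := htail q hq
        rw [← Nat.add_sub_cancel' hji, List.take_add] at hp
        rcases List.mem_append.mp hp with hp | hp
        · have hq'' : q ∈ Q.drop i := by
            rw [← Nat.add_sub_cancel' hji, ← List.drop_drop] at hq
            exact List.mem_of_mem_drop hq
          exact hinv p hp q hq''
        · have := hmid p hp
          omega
      simp only [winA, winB]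
      simp only [dif_pos h, ht1, hjs, hwindow, ← hj, if_neg hwne,
        if_pos (show i < j by omega)]
      congr 1
      exact ih j hinv'
    · simp only [winA, winB]
      rw [dif_neg h, dif_neg h]

-- ===== VERDICT (by name: the statement is the Claim_ definition above) =====
theorem windowing_py_spec : Claim_equal_windowing_py := by
  intro P L _
  unfold Spec_windowing_py windowing_py windowing_py_alt
  by_cases hP : P = []
  · subst hP
    have hQ : PySem.List.sorted ([] : List (Int × Int)) (fun x => x.1) = [] :=
      (PySem.List.sorted_eq_nil_iff _ _ _).mpr rfl
    rw [if_pos rfl, hQ]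
    rfl
  · rw [if_neg hP]
    have hs := PySem.List.sorted_pairwise P (fun x : Int × Int => x.1)
    by_cases hL : 0 < L
    · exact winA_eq_winB _ L hL hs _ 0 (by simp)
    · rw [winA_nil _ L (by omega), winB_nil _ L (by omega)]
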